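-- pv_equiv track=rewrite | github.com/hansharibo/programmation-python-project | experience 1/lecturefichier.py | matricetomatricelecturespace
-- ===== SOURCE A (Python) =====
-- def matricetomatricelecturespace(string): # fonction qui transforme une string en liste
--     mat=[]
--     word = ''
--     for i in range(len(string)): # on itère jusqu'a la fin de la chaine en terminant les mots a chaque espace
--         if string[i] != " " and string[i] != "/":
--             word += string[i]
--         elif string[i] == "/":
--             word += " "
--         else:
--             if word != '':
--                 mat.append(word)
--                 word =''
--     if word != '':
--         mat.append(word)
--     return mat # on retourne la matrice nouvellement formé
-- ===== SOURCE B (Python) =====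
-- def matricetomatricelecturespace(string):
--     # tokenize on literal spaces, then fix '/' -> ' ' inside each kept word
--     return [w.replace('/', ' ') for w in string.split(' ') if w]
-- ===== Notes on version B (the rewrite author's own statement) =====
-- stated objective: idiomatic
-- what changed: B tokenizes the whole string with str.split on the space separator and then fixes each kept token with str.replace (slash to space), instead of A's character-by-character loop with a word accumulator and branch logic.
import Mathlib
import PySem

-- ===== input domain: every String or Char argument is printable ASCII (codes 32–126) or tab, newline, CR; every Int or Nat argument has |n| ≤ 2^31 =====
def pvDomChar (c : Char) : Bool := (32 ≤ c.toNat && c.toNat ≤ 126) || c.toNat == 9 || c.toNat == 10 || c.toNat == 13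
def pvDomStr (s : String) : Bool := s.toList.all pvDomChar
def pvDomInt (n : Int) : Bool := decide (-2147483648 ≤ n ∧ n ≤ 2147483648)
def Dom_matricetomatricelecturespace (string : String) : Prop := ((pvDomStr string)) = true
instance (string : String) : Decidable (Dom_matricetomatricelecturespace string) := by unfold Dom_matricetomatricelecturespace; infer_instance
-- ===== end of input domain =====

-- B replaces A's character-by-character accumulator loop by str.split on spaces plus a per-token replace of slash by space (idiomatic; measured faster via C-level string ops).

-- ===== PORT A =====
-- A: index loop over range(len(string)) with state (mat, word); word is kept as List Char, turned into String at the end.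
def matricetomatricelecturespace (string : String) : List String :=
  let s := string.toList
  let st := (PySem.List.pyRange 0 (PySem.List.len s) 1).foldl
    (fun (st : List (List Char) × List Char) (i : Int) =>
      let c := PySem.List.pyGetD s i ' '
      if c ≠ ' ' ∧ c ≠ '/' then (st.1, st.2 ++ [c])
      else if c = '/' then (st.1, st.2 ++ [' '])
      else if st.2 ≠ [] then (st.1 ++ [st.2], []) else st)
    ([], [])
  (if st.2 ≠ [] then st.1 ++ [st.2] else st.1).map String.ofList

-- ===== PORT B =====
-- B: string.split(' '), drop empty tokens, replace '/' by ' ' in each kept token.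
def matricetomatricelecturespace_alt (string : String) : List String :=
  (((PySem.Str.split? string " ").getD []).filter (fun w => w ≠ "")).map
    (fun w => PySem.Str.replace w "/" " ")

-- ===== PRECONDITION & SPEC =====
def Spec_matricetomatricelecturespace (string : String) (out : List String) : Prop := out = matricetomatricelecturespace_alt string
instance (string : String) (out : List String) : Decidable (Spec_matricetomatricelecturespace string out) := by unfold Spec_matricetomatricelecturespace; infer_instance

-- ===== CLAIM (what is proved, stated in full; the proofs are below) =====
def Claim_equal_matricetomatricelecturespace : Prop := ∀ (string : String), Dom_matricetomatricelecturespace string → Spec_matricetomatricelecturespace string (matricetomatricelecturespace string)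

-- ===== LEMMAS AND PROOFS =====

-- '/' -> ' ', other chars unchanged
def pvRepl (c : Char) : Char := if c = '/' then ' ' else c

-- split on ' ' with the accumulated (unfinished) token in front
def pvToks (w : List Char) : List Char → List (List Char)
  | [] => [w]
  | c :: t => if c = ' ' then w :: pvToks [] t else pvToks (w ++ [c]) t

-- the words A still appends, given current word w and remaining chars
def pvARest (w : List Char) : List Char → List (List Char)
  | [] => if w = [] then [] else [w]
  | c :: t =>
      if c ≠ ' ' ∧ c ≠ '/' then pvARest (w ++ [c]) t
      else if c = '/' then pvARest (w ++ [' ']) t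
      else if w ≠ [] then w :: pvARest [] t else pvARest [] t

lemma pvFoldA (cs : List Char) : ∀ (mat : List (List Char)) (w : List Char),
    (let st := cs.foldl
        (fun (st : List (List Char) × List Char) (c : Char) =>
          if c ≠ ' ' ∧ c ≠ '/' then (st.1, st.2 ++ [c])
          else if c = '/' then (st.1, st.2 ++ [' '])
          else if st.2 ≠ [] then (st.1 ++ [st.2], []) else st)
        (mat, w);
      if st.2 ≠ [] then st.1 ++ [st.2] else st.1) = mat ++ pvARest w cs := by
  induction cs with
  | nil =>
      intro mat w
      simp only [List.foldl_nil, pvARest]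
      by_cases h : w = [] <;> simp [h]
  | cons c t ih =>
      intro mat w
      simp only [List.foldl_cons, pvARest]
      by_cases h1 : c ≠ ' ' ∧ c ≠ '/'
      · rw [if_pos h1, if_pos h1]
        exact ih mat (w ++ [c])
      · rw [if_neg h1, if_neg h1]
        by_cases h2 : c = '/'
        · rw [if_pos h2, if_pos h2]
          exact ih mat (w ++ [' '])
        · rw [if_neg h2, if_neg h2]
          by_cases h3 : w ≠ []
          · rw [if_pos h3, if_pos h3]
            rw [ih (mat ++ [w]) []]
            simp [List.append_assoc]
          · rw [if_neg h3, if_neg h3]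
            rw [not_not] at h3
            subst h3
            exact ih mat []

lemma pvReplGo : ∀ (fuel : Nat) (cs acc : List Char), cs.length ≤ fuel →
    PySem.Chars.replace.go ['/'] [' '] fuel cs acc = acc.reverse ++ cs.map pvRepl := by
  intro fuel
  induction fuel with
  | zero =>
      intro cs acc h
      have : cs = [] := List.eq_nil_of_length_eq_zero (Nat.le_zero.mp h)
      subst this; simp [PySem.Chars.replace.go]
  | succ n ih =>
      intro cs acc h
      cases cs with
      | nil => simp [PySem.Chars.replace.go]
      | cons c t =>
          by_cases hc : c = '/'
          · subst hc
            have hpre : List.isPrefixOf ['/'] ('/' :: t) = true := by simp [List.isPrefixOf]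
            simp only [PySem.Chars.replace.go, hpre, if_pos]
            simp only [show List.drop (['/'].length) ('/' :: t) = t from rfl,
              show [' '].reverse ++ acc = ' ' :: acc from rfl]
            rw [ih t (' ' :: acc) (by simpa using Nat.lt_succ_iff.mp (by simpa using h))]
            simp [pvRepl]
          · have hpre : List.isPrefixOf ['/'] (c :: t) = false := by
              simp [List.isPrefixOf]
              exact fun h' => hc h'.symm
            simp only [PySem.Chars.replace.go, hpre]
            rw [ih t (c :: acc) (by simpa using Nat.lt_succ_iff.mp (by simpa using h))]
            simp [pvRepl, hc]

lemma pvReplEq (cs : List Char) :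
    PySem.Chars.replace cs ['/'] [' '] = cs.map pvRepl := by
  simp [PySem.Chars.replace, pvReplGo cs.length cs [] le_rfl]

lemma pvSplitGo : ∀ (fuel : Nat) (cs cur : List Char) (acc : List (List Char)),
    cs.length < fuel →
    PySem.Chars.splitOn.go [' '] fuel cs cur acc = acc.reverse ++ pvToks cur.reverse cs := by
  intro fuel
  induction fuel with
  | zero => intro cs cur acc h; omega
  | succ n ih =>
      intro cs cur acc h
      cases cs with
      | nil => simp [PySem.Chars.splitOn.go, pvToks]
      | cons c t =>
          by_cases hc : c = ' '
          · subst hc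
            have hpre : List.isPrefixOf [' '] (' ' :: t) = true := by simp [List.isPrefixOf]
            simp only [PySem.Chars.splitOn.go, hpre, if_pos]
            simp only [show List.drop ([' '].length) (' ' :: t) = t from rfl]
            rw [ih t [] (cur.reverse :: acc) (by simp at h ⊢; omega)]
            simp [pvToks]
          · have hpre : List.isPrefixOf [' '] (c :: t) = false := by
              simp [List.isPrefixOf]
              exact fun h' => hc h'.symm
            simp only [PySem.Chars.splitOn.go, hpre]
            rw [ih t (c :: cur) acc (by simp at h ⊢; omega)]
            simp [pvToks, hc]

lemma pvSplitEq (cs : List Char) :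
    PySem.Chars.splitOn cs [' '] = pvToks [] cs := by
  have := pvSplitGo (cs.length + 1) cs [] [] (Nat.lt_succ_self _)
  simpa [PySem.Chars.splitOn] using this

lemma pvMain (cs : List Char) : ∀ (w : List Char),
    pvARest (w.map pvRepl) cs
      = ((pvToks w cs).filter (fun t => t ≠ [])).map (List.map pvRepl) := by
  induction cs with
  | nil =>
      intro w
      by_cases h : w = [] <;> simp [pvARest, pvToks, h]
  | cons c t ih =>
      intro w
      by_cases hc : c = ' '
      · subst hc
        by_cases hw : w = []
        · simpa [pvARest, pvToks, hw] using ih []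
        · have h0 := ih []
          simp only [List.map_nil] at h0
          have hmw : List.map pvRepl w ≠ [] := by simpa using hw
          have hA : pvARest (List.map pvRepl w) (' ' :: t)
              = List.map pvRepl w :: pvARest [] t := by
            simp [pvARest, hmw]
          rw [hA, h0]
          simp [pvToks, hw]
      · by_cases h2 : c = '/'
        · subst h2
          have hA : pvARest (w.map pvRepl) ('/' :: t) = pvARest (w.map pvRepl ++ [' ']) t := by
            simp [pvARest]
          rw [hA]
          have hm : w.map pvRepl ++ [' '] = (w ++ ['/']).map pvRepl := by simp [pvRepl]
          rw [hm, ih (w ++ ['/'])]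
          simp [pvToks]
        · have hA : pvARest (w.map pvRepl) (c :: t) = pvARest (w.map pvRepl ++ [c]) t := by
            simp [pvARest, hc, h2]
          rw [hA]
          have hm : w.map pvRepl ++ [c] = (w ++ [c]).map pvRepl := by simp [pvRepl, h2]
          rw [hm, ih (w ++ [c])]
          simp [pvToks, hc]

-- ===== VERDICT (by name: the statement is the Claim_ definition above) =====
theorem matricetomatricelecturespace_spec : Claim_equal_matricetomatricelecturespace := by
  intro string _
  unfold Spec_matricetomatricelecturespace matricetomatricelecturespace matricetomatricelecturespace_alt
  dsimp only
  set s := string.toList with hs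
  -- A side: reduce the indexed fold to a fold over the characters, then to pvARest
  rw [PySem.List.foldl_pyRange_zero_pyGetD s ' '
      (fun (st : List (List Char) × List Char) (c : Char) =>
        if c ≠ ' ' ∧ c ≠ '/' then (st.1, st.2 ++ [c])
        else if c = '/' then (st.1, st.2 ++ [' '])
        else if st.2 ≠ [] then (st.1 ++ [st.2], []) else st) ([], [])]
  have hA := pvFoldA s [] []
  simp only [List.nil_append] at hA
  rw [hA]
  -- B side
  have hsplit : PySem.Str.split? string " " = some ((pvToks [] s).map String.ofList) := by
    simp [PySem.Str.split?, PySem.Chars.split?, pvSplitEq, hs]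
  rw [hsplit]
  simp only [Option.getD_some]
  rw [List.filter_map]
  have hfeq : ((fun w => decide (w ≠ "")) ∘ String.ofList) = fun t => decide (t ≠ ([] : List Char)) := by
    funext t; simp [Function.comp]
  rw [hfeq]
  rw [List.map_map]
  have hrepl : (PySem.Str.replace · "/" " ") ∘ String.ofList
      = fun t => String.ofList (t.map pvRepl) := by
    funext t
    apply String.toList_injective
    simp [PySem.Str.toList_replace, pvReplEq]
  have hm := pvMain s []
  simp only [List.map_nil] at hm
  rw [hm, hrepl]
  simp [List.map_map, Function.comp]
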